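-- pv_equiv track=rewrite | github.com/lukasz-ratajczak/CSV_merger | app/main.py | print_to_rows
-- ===== SOURCE A (Python) =====
-- def print_to_rows(fcolumn_list, scolumn_list):
--     temp = ''
--     result = []
--     index = 0
--
--     for n in range(0, len(fcolumn_list[0]) - 1):
--         for m in range(0, len(fcolumn_list) - 1):
--             temp += (f"{fcolumn_list[m][n]},")
--         result.append(temp)
--         temp = ''
--     temp = ''
--     for n in range(0, len(scolumn_list[0]) - 1):
--         for m in range(0, len(scolumn_list) - 1):
--             temp += (f"{scolumn_list[m][n]},")
--         temp = temp[:-1]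
--         try:
--             result[index] = result[index] + temp
--         except IndexError:
--             result.append("," * (len(fcolumn_list) - 1) + temp)
--         index += 1
--         temp = ''
--
--     if len(result[0].split(',')) != len(result[-1].split(',')):
--         for i in range(len(result)):
--
--             if len(result[i].split(',')) != len(result[0].split(',')):
--                 result[i] = result[i] + "," * (len(scolumn_list) - 2)
--     return result
-- ===== SOURCE B (Python) =====
-- def print_to_rows(fcolumn_list, scolumn_list):
--     n_left = len(fcolumn_list[0]) - 1
--     n_right = len(scolumn_list[0]) - 1
--     total = max(n_left, n_right)
--     left_pad = "," * (len(fcolumn_list) - 1)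
--
--     def row(i):
--         out = left_pad if i >= n_left else "".join(c[i] + "," for c in fcolumn_list[:-1])
--         if i < n_right:
--             out += "".join(c[i] + "," for c in scolumn_list[:-1])[:-1]
--         return out
--
--     w_first = row(0).count(",")
--     tail = "," * (len(scolumn_list) - 2) if row(total - 1).count(",") != w_first else ""
--     return [row(i) + (tail if row(i).count(",") != w_first else "") for i in range(total)]
-- ===== Notes on version B (the rewrite author's own statement) =====
-- stated objective: simpler
-- what changed: B computes each output row directly with a closed-form row(i) function over max(n_left,n_right) row indices and decides the ragged-row padding inline from precomputed first/last comma counts, replacing A's three staged passes (build left rows, merge right rows via an index counter with try/except IndexError, then a mutating fix-up loop over the result).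
import Mathlib
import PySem

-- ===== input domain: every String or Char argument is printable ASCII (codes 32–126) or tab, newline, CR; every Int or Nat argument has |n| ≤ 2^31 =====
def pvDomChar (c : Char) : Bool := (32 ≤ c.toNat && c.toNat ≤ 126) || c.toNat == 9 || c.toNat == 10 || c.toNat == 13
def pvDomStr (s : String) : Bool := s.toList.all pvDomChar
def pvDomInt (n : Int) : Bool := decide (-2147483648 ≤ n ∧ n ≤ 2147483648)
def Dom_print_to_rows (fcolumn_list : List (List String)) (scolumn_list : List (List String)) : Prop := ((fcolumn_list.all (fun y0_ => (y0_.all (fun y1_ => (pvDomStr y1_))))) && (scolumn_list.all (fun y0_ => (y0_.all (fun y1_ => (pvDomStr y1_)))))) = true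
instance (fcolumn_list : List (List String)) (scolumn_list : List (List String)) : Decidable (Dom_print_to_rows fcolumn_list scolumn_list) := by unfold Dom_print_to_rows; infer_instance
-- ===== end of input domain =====

-- B computes each output row directly with a closed-form row function over max(n_left,n_right)
-- indices and applies the ragged-row padding inline from precomputed first/last comma counts,
-- replacing A's three staged passes (build, index/try-except merge, mutating fix-up): simpler.


-- ===== PORT A =====
-- indices m, n come from non-negative ranges, so `List.getD` is exact where Python succeeds;
-- out-of-range access raises IndexError in Python and is excluded by Pre_.
def print_to_rows (fcolumn_list : List (List String)) (scolumn_list : List (List String)) : List String :=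
  -- first loop: build one row string per n, trailing comma kept
  let result : List String :=
    (List.range ((fcolumn_list.headD []).length - 1)).foldl
      (fun res n =>
        let temp := (List.range (fcolumn_list.length - 1)).foldl
          (fun t m => t ++ ((fcolumn_list.getD m []).getD n "") ++ ",") ""
        res ++ [temp]) []
  -- second loop: index == n throughout; try/except IndexError becomes a length test
  let result : List String :=
    (List.range ((scolumn_list.headD []).length - 1)).foldl
      (fun res n =>
        let temp := (List.range (scolumn_list.length - 1)).foldl
          (fun t m => t ++ ((scolumn_list.getD m []).getD n "") ++ ",") ""
        let temp := PySem.Str.slice temp none (some (-1))   -- temp[:-1]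
        if n < res.length then res.set n (res.getD n "" ++ temp)
        else res ++ [String.ofList (List.replicate (fcolumn_list.length - 1) ',') ++ temp]) result
  -- ragged-row normalisation; result[0] / result[-1]
  if ((PySem.Str.split? (result.headD "") ",").getD []).length ≠ ((PySem.Str.split? (result.getLastD "") ",").getD []).length then
    (List.range result.length).foldl
      (fun res i =>
        if ((PySem.Str.split? (res.getD i "") ",").getD []).length ≠ ((PySem.Str.split? (res.headD "") ",").getD []).length
        then res.set i (res.getD i "" ++ String.ofList (List.replicate (scolumn_list.length - 2) ','))
        else res) result
  else result

-- ===== PORT B =====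
-- B's row(i): the left part (or the comma padding when i is past the left block) followed by
-- the trimmed right part when i is inside the right block; fcolumn_list[:-1] is dropLast.
def pvRow (fcolumn_list : List (List String)) (scolumn_list : List (List String))
    (nL nR : Nat) (lpad : String) (i : Nat) : String :=
  (if nL ≤ i then lpad
   else PySem.Str.join "" (fcolumn_list.dropLast.map (fun c => c.getD i "" ++ ",")))
  ++ (if i < nR then
        PySem.Str.slice (PySem.Str.join "" (scolumn_list.dropLast.map (fun c => c.getD i "" ++ ","))) none (some (-1))
      else "")

def print_to_rows_alt (fcolumn_list : List (List String)) (scolumn_list : List (List String)) : List String :=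
  let nL := (fcolumn_list.headD []).length - 1
  let nR := (scolumn_list.headD []).length - 1
  let total := max nL nR
  let lpad := String.ofList (List.replicate (fcolumn_list.length - 1) ',')
  let wFirst := PySem.Str.count (pvRow fcolumn_list scolumn_list nL nR lpad 0) ","
  let tail := if PySem.Str.count (pvRow fcolumn_list scolumn_list nL nR lpad (total - 1)) "," ≠ wFirst
              then String.ofList (List.replicate (scolumn_list.length - 2) ',') else ""
  (List.range total).map (fun i =>
    pvRow fcolumn_list scolumn_list nL nR lpad i
      ++ (if PySem.Str.count (pvRow fcolumn_list scolumn_list nL nR lpad i) "," ≠ wFirst then tail else ""))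

-- ===== PRECONDITION & SPEC =====
-- Pre_ excludes exactly the inputs where Python A raises: an empty column list (IndexError on
-- fcolumn_list[0] / scolumn_list[0]), zero produced rows (IndexError on result[0]), or a read
-- column shorter than the first column's height (IndexError on col[n]).
def Pre_print_to_rows (fcolumn_list : List (List String)) (scolumn_list : List (List String)) : Prop :=
  fcolumn_list ≠ [] ∧ scolumn_list ≠ [] ∧
  (2 ≤ (fcolumn_list.headD []).length ∨ 2 ≤ (scolumn_list.headD []).length) ∧
  (∀ c ∈ fcolumn_list.take (fcolumn_list.length - 1), (fcolumn_list.headD []).length - 1 ≤ c.length) ∧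
  (∀ c ∈ scolumn_list.take (scolumn_list.length - 1), (scolumn_list.headD []).length - 1 ≤ c.length)
instance (fcolumn_list : List (List String)) (scolumn_list : List (List String)) : Decidable (Pre_print_to_rows fcolumn_list scolumn_list) := by unfold Pre_print_to_rows; infer_instance

def pvWitness_print_to_rows : List (List String) × List (List String) :=
  ([["a", "b"], ["z"]], [["c", "d"], ["w"]])

def Spec_print_to_rows (fcolumn_list : List (List String)) (scolumn_list : List (List String)) (out : List String) : Prop := out = print_to_rows_alt fcolumn_list scolumn_list
instance (fcolumn_list : List (List String)) (scolumn_list : List (List String)) (out : List String) : Decidable (Spec_print_to_rows fcolumn_list scolumn_list out) := by unfold Spec_print_to_rows; infer_instance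

-- ===== CLAIM (what is proved, stated in full; the proofs are below) =====
def Claim_equal_print_to_rows : Prop := ∀ (fcolumn_list : List (List String)) (scolumn_list : List (List String)), Dom_print_to_rows fcolumn_list scolumn_list → Pre_print_to_rows fcolumn_list scolumn_list → Spec_print_to_rows fcolumn_list scolumn_list (print_to_rows fcolumn_list scolumn_list)

-- ===== LEMMAS AND PROOFS =====

-- join "" = concat, via toList
theorem join_empty_cons (a : String) (l : List String) :
    PySem.Str.join "" (a :: l) = a ++ PySem.Str.join "" l := by
  rw [← String.toList_inj]
  cases l with
  | nil => simp [PySem.Str.join, PySem.Chars.join_singleton, PySem.Chars.join_nil]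
  | cons b rest =>
      simp only [PySem.Str.join, List.map_cons]
      rw [PySem.Chars.join_cons_cons]
      simp

theorem foldl_append_eq_join {α : Type} (l : List α) (h : α → String) (t : String) :
    l.foldl (fun t x => t ++ h x) t = t ++ PySem.Str.join "" (l.map h) := by
  induction l generalizing t with
  | nil => rw [← String.toList_inj]; simp [PySem.Str.join, PySem.Chars.join_nil]
  | cons a l ih =>
      simp only [List.foldl_cons, List.map_cons, join_empty_cons]
      rw [ih, ← String.append_assoc]

theorem map_range_getD {α : Type} (l : List α) (d : α) (k : Nat) (hk : k ≤ l.length) :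
    (List.range k).map (fun m => l.getD m d) = l.take k := by
  apply List.ext_getElem
  · simp [Nat.min_eq_left hk]
  · intro i h1 h2
    simp only [List.getElem_map, List.getElem_range, List.getElem_take]
    rw [List.getD_eq_getElem _ _ (by simp at h1; omega)]

theorem row_build_eq (cols : List (List String)) (n : Nat) :
    (List.range (cols.length - 1)).foldl
      (fun t m => t ++ ((cols.getD m []).getD n "") ++ ",") ""
    = PySem.Str.join "" (cols.dropLast.map (fun col => col.getD n "" ++ ",")) := by
  have h1 : (fun (t : String) m => t ++ ((cols.getD m []).getD n "") ++ ",")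
      = fun (t : String) m => t ++ (((cols.getD m []).getD n "") ++ ",") := by
    funext t m; rw [String.append_assoc]
  rw [h1, foldl_append_eq_join]
  have h2 : (List.range (cols.length - 1)).map (fun m => (cols.getD m []).getD n "" ++ ",")
      = (cols.take (cols.length - 1)).map (fun col => col.getD n "" ++ ",") := by
    have := map_range_getD cols [] (cols.length - 1) (by omega)
    calc (List.range (cols.length - 1)).map (fun m => (cols.getD m []).getD n "" ++ ",")
        = ((List.range (cols.length - 1)).map (fun m => cols.getD m [])).map
            (fun col => col.getD n "" ++ ",") := by rw [List.map_map]; rfl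
      _ = _ := by rw [this]
  rw [h2, List.dropLast_eq_take]
  simp

def mergeSpec (L : List String) (g : Nat → String) (pad : String) (k : Nat) : List String :=
  ((List.range (min L.length k)).map fun i => L.getD i "" ++ g i)
    ++ L.drop k
    ++ (((List.range k).drop L.length).map fun i => pad ++ g i)

theorem merge_foldl_eq (L : List String) (g : Nat → String) (pad : String) (k : Nat) :
    (List.range k).foldl
      (fun res n =>
        if n < res.length then res.set n (res.getD n "" ++ g n)
        else res ++ [pad ++ g n]) L
    = mergeSpec L g pad k := by
  induction k with
  | zero => simp [mergeSpec]
  | succ k ih =>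
      rw [List.range_succ, List.foldl_append, ih]
      simp only [List.foldl_cons, List.foldl_nil]
      by_cases h : k < L.length
      · -- set branch: third block is empty, spec k = P ++ L.drop k
        have h3 : ((List.range k).drop L.length) = [] := by
          apply List.drop_eq_nil_of_le; simp; omega
        have hmin : min L.length k = k := by omega
        have hmin' : min L.length (k + 1) = k + 1 := by omega
        have h3' : ((List.range (k + 1)).drop L.length) = [] := by
          apply List.drop_eq_nil_of_le; simp; omega
        have hP : ((List.range k).map fun i => L.getD i "" ++ g i).length = k := by simp
        have hlen : (mergeSpec L g pad k).length = L.length := by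
          simp [mergeSpec, h3, hmin]; omega
        rw [if_pos (by rw [hlen]; exact h)]
        have hdrop : L.drop k = L.getD k "" :: L.drop (k + 1) := by
          rw [List.getD_eq_getElem _ _ h]
          exact (List.drop_eq_getElem_cons h)
        simp only [mergeSpec, h3, h3', hmin, hmin', List.map_nil, List.append_nil]
        rw [hdrop]
        have hget : ((List.range k).map (fun i => L.getD i "" ++ g i)
            ++ L.getD k "" :: L.drop (k + 1)).getD k "" = L.getD k "" := by
          rw [List.getD_eq_getElem _ _ (by simp)]
          rw [List.getElem_append_right (by simp)]
          simp
        rw [hget, List.set_append_right _ _ (by simp)]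
        simp only [hP, Nat.sub_self, List.set_cons_zero]
        rw [List.range_succ, List.map_append]
        simp
      · -- append branch
        have hL : L.length ≤ k := by omega
        have hdropL : L.drop k = [] := List.drop_eq_nil_of_le hL
        have hdropL' : L.drop (k + 1) = [] := List.drop_eq_nil_of_le (by omega)
        have hmin : min L.length k = L.length := by omega
        have hmin' : min L.length (k + 1) = L.length := by omega
        have hlen : (mergeSpec L g pad k).length = k := by
          simp [mergeSpec, hdropL, hmin]; omega
        rw [if_neg (by rw [hlen]; omega)]
        simp only [mergeSpec, hdropL, hdropL', hmin, hmin', List.append_nil]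
        rw [List.range_succ, List.drop_append_of_le_length (by simp; omega), List.map_append]
        simp [List.append_assoc]

theorem norm_aux (l : List String) (tail : String)
    (c : String → String → Prop) [inst : ∀ a b, Decidable (c a b)]
    (hc : ∀ a, ¬ c a a) (k : Nat) (hk : k ≤ l.length) :
    (List.range k).foldl
      (fun res i =>
        if c (res.getD i "") (res.headD "") then res.set i (res.getD i "" ++ tail) else res) l
    = (l.take k).map (fun r => if c r (l.headD "") then r ++ tail else r) ++ l.drop k := by
  induction k with
  | zero => simp
  | succ k ih =>
      have hk' : k < l.length := by omega
      rw [List.range_succ, List.foldl_append, ih (by omega)]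
      simp only [List.foldl_cons, List.foldl_nil]
      set f : String → String := fun r => if c r (l.headD "") then r ++ tail else r with hf
      have hT : ((l.take k).map f).length = k := by simp; omega
      have hdrop : l.drop k = l.getD k "" :: l.drop (k + 1) := by
        rw [List.getD_eq_getElem _ _ hk']
        exact List.drop_eq_getElem_cons hk'
      have hget : ((l.take k).map f ++ l.drop k).getD k "" = l.getD k "" := by
        rw [hdrop, List.getD_eq_getElem _ _ (by simp; omega)]
        rw [List.getElem_append_right (by simp)]
        simp [Nat.min_eq_left (Nat.le_of_lt hk')]
      have hhead : ((l.take k).map f ++ l.drop k).headD "" = l.headD "" := by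
        cases l with
        | nil => simp
        | cons a tl =>
            cases k with
            | zero => simp
            | succ k =>
                rw [List.take_succ_cons, List.map_cons, List.cons_append]
                simp only [List.headD_cons]
                rw [hf]
                simp only [List.headD_cons]
                rw [if_neg (hc a)]
      have htake : l.take (k + 1) = l.take k ++ [l.getD k ""] := by
        rw [List.getD_eq_getElem _ _ hk']
        rw [List.take_add_one, List.getElem?_eq_getElem hk']
        rfl
      rw [hget, hhead, htake, List.map_append, List.map_cons, List.map_nil]
      by_cases hcond : c (l.getD k "") (l.headD "")
      · rw [if_pos hcond]
        rw [hdrop, List.set_append_right _ _ (by omega), hT, Nat.sub_self, List.set_cons_zero]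
        rw [hf]
        simp only []
        rw [if_pos hcond, List.append_assoc]
        rfl
      · rw [if_neg hcond]
        rw [hdrop, hf]
        simp only []
        rw [if_neg hcond, List.append_assoc]
        rfl

theorem norm_foldl_eq (l : List String) (tail : String)
    (c : String → String → Prop) [inst : ∀ a b, Decidable (c a b)]
    (hc : ∀ a, ¬ c a a) :
    (List.range l.length).foldl
      (fun res i =>
        if c (res.getD i "") (res.headD "") then res.set i (res.getD i "" ++ tail) else res) l
    = l.map (fun r => if c r (l.headD "") then r ++ tail else r) := by
  rw [norm_aux l tail c hc l.length (le_refl _)]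
  simp

-- A's merged intermediate list is exactly B's row function mapped over range (max nL nR)
theorem mergeSpec_eq_map (F G : Nat → String) (pad : String) (nL nR : Nat) :
    mergeSpec ((List.range nL).map F) G pad nR
    = (List.range (max nL nR)).map
        (fun i => (if nL ≤ i then pad else F i) ++ (if i < nR then G i else "")) := by
  apply List.ext_getElem
  · simp [mergeSpec]; omega
  · intro i h1 h2
    simp only [List.getElem_map, List.getElem_range]
    have hi : i < max nL nR := by simpa using h2
    simp only [mergeSpec, List.length_map, List.length_range]
    by_cases hA : i < min nL nR
    · rw [List.getElem_append_left (by simp; omega), List.getElem_append_left (by simp; omega)]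
      simp only [List.getElem_map, List.getElem_range]
      rw [List.getD_eq_getElem _ _ (by simp; omega)]
      simp only [List.getElem_map, List.getElem_range]
      rw [if_neg (by omega), if_pos (by omega)]
    · by_cases hB : i < nL
      · -- nR ≤ i < nL : element of L.drop nR
        have hnR : nR ≤ i := by omega
        rw [List.getElem_append_left (by simp; omega)]
        rw [List.getElem_append_right (by simp; omega)]
        rw [List.getElem_drop]
        simp only [List.getElem_map, List.getElem_range]
        rw [if_neg (by omega), if_neg (by omega)]
        rw [String.append_empty]
        congr 1; simp; omega
      · -- nL ≤ i < nR : element of the padded third block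
        have hnL : nL ≤ i := by omega
        have hiR : i < nR := by omega
        rw [List.getElem_append_right (by simp; omega)]
        simp only [List.getElem_map, List.getElem_drop, List.getElem_range]
        rw [if_pos (by omega), if_pos (by omega)]
        congr 2
        simp; omega

-- len(x.split(',')) = x.count(',') + 1
theorem count_go_acc (sub : List Char) : ∀ fuel l acc, PySem.Chars.count.go sub fuel l acc = acc + PySem.Chars.count.go sub fuel l 0 := by
  intro fuel
  induction fuel with
  | zero => intro l acc; simp [PySem.Chars.count.go]
  | succ f ih =>
      intro l acc
      cases l with
      | nil => simp [PySem.Chars.count.go]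
      | cons c t =>
          simp only [PySem.Chars.count.go]
          split
          · rw [ih _ (acc+1), ih _ 1]; omega
          · exact ih t acc

theorem split_go_len (sep : List Char) (hsep : sep ≠ []) :
    ∀ fuel l cur acc, l.length ≤ fuel →
    (PySem.Chars.splitOn.go sep (fuel+1) l cur acc).length = acc.length + 1 + PySem.Chars.count.go sep fuel l 0 := by
  intro fuel
  induction fuel with
  | zero =>
      intro l cur acc h
      have : l = [] := List.eq_nil_of_length_eq_zero (by omega)
      subst this
      simp [PySem.Chars.splitOn.go, PySem.Chars.count.go]
  | succ f ih =>
      intro l cur acc h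
      cases l with
      | nil => simp [PySem.Chars.splitOn.go, PySem.Chars.count.go]
      | cons c t =>
          simp only [PySem.Chars.splitOn.go, PySem.Chars.count.go]
          split
          · rename_i hpre
            have hsl : 1 ≤ sep.length := by cases sep <;> simp_all
            have hlen : (List.drop sep.length (c :: t)).length ≤ f := by
              simp only [List.length_drop, List.length_cons] at *
              omega
            rw [ih _ _ _ hlen, count_go_acc sep f _ 1]
            simp; omega
          · have : t.length ≤ f := by simp at h; omega
            rw [ih _ _ _ this]

theorem splitlen_eq_count (x : String) :
    ((PySem.Str.split? x ",").getD []).length = PySem.Str.count x "," + 1 := by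
  simp only [PySem.Str.split?, PySem.Str.count, PySem.Chars.split?, PySem.Chars.count]
  norm_num [PySem.Chars.splitOn]
  have h := split_go_len (",".toList) (by decide) x.length x.toList [] [] (by simp)
  simp at h
  simp [h]
  omega

theorem splitlen_ne_iff (a b : String) :
    (((PySem.Str.split? a ",").getD []).length ≠ ((PySem.Str.split? b ",").getD []).length)
    ↔ (PySem.Str.count a "," ≠ PySem.Str.count b ",") := by
  rw [splitlen_eq_count, splitlen_eq_count]; omega

theorem headD_map_range (g : Nat → String) (n : Nat) (hn : 0 < n) :
    ((List.range n).map g).headD "" = g 0 := by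
  obtain ⟨m, rfl⟩ := Nat.exists_eq_succ_of_ne_zero (by omega : n ≠ 0)
  rw [List.range_succ_eq_map]
  simp

theorem getLastD_map_range (g : Nat → String) (n : Nat) (hn : 0 < n) :
    ((List.range n).map g).getLastD "" = g (n - 1) := by
  obtain ⟨m, rfl⟩ := Nat.exists_eq_succ_of_ne_zero (by omega : n ≠ 0)
  rw [List.range_succ, List.map_append]
  simp

-- ===== VERDICT (by name: the statement is the Claim_ definition above) =====
theorem print_to_rows_spec : Claim_equal_print_to_rows := by
  intro f s _dom pre
  obtain ⟨hf, hs, hge, -, -⟩ := pre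
  unfold Spec_print_to_rows
  simp only [print_to_rows, print_to_rows_alt]
  rw [PySem.List.foldl_append_singleton_eq_map]
  simp only [List.nil_append, row_build_eq]
  rw [merge_foldl_eq, mergeSpec_eq_map]
  rw [norm_foldl_eq _ _
      (fun a b => ((PySem.Str.split? a ",").getD []).length ≠ ((PySem.Str.split? b ",").getD []).length)
      (fun a h => h rfl)]
  set nL := (f.headD []).length - 1 with hnL
  set nR := (s.headD []).length - 1 with hnR
  have htot : 0 < max nL nR := by
    rcases hge with h | h
    · have : 1 ≤ nL := by omega
      omega
    · have : 1 ≤ nR := by omega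
      omega
  set g : Nat → String := fun i =>
    (if nL ≤ i then String.ofList (List.replicate (f.length - 1) ',')
     else PySem.Str.join "" (f.dropLast.map (fun c => c.getD i "" ++ ",")))
    ++ (if i < nR then
          PySem.Str.slice (PySem.Str.join "" (s.dropLast.map (fun c => c.getD i "" ++ ","))) none (some (-1))
        else "") with hg
  have hrow : ∀ i, pvRow f s nL nR (String.ofList (List.replicate (f.length - 1) ',')) i = g i := by
    intro i; rfl
  simp only [hrow]
  rw [headD_map_range g _ htot, getLastD_map_range g _ htot]
  by_cases hw : PySem.Str.count (g (max nL nR - 1)) "," = PySem.Str.count (g 0) ","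
  · -- widths agree: A leaves the list alone, B appends the empty tail
    rw [if_neg (by rw [splitlen_ne_iff]; omega), if_neg (by omega)]
    apply List.ext_getElem (by simp)
    intro i h1 h2
    simp only [List.getElem_map, List.getElem_range, ite_self, String.append_empty]
  · -- widths differ: both pad exactly the rows whose count differs from row 0's
    rw [if_pos (by rw [splitlen_ne_iff]; omega), if_pos (by omega), List.map_map]
    apply List.map_congr_left
    intro i _
    simp only [Function.comp]
    by_cases hr : PySem.Str.count (g i) "," = PySem.Str.count (g 0) ","
    · rw [if_neg (by rw [splitlen_ne_iff]; omega), if_neg (by omega), String.append_empty]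
    · rw [if_pos (by rw [splitlen_ne_iff]; omega), if_pos (by omega)]
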